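-- pv_equiv track=rewrite | github.com/Jung-jieun/Coding-Test | 프로그래머스/2/49993. 스킬트리/스킬트리.py | solution
-- ===== SOURCE A (Python) =====
-- def solution(skill, skill_trees):
--     answer = 0
--
--     for tree in skill_trees:
--         exist = ''
--         not_exist = ''
--
--         for t in tree:
--             if t not in skill:
--                 not_exist += t
--             else:
--                 exist += t
--
--         length = len(exist)
--         if exist==skill[:length]:
--             answer += 1
--         elif len(exist)==0 and not_exist:
--             answer += 1
--
--     return answer
-- ===== SOURCE B (Python) =====
-- def solution(skill, skill_trees):
--     answer = 0
--     for tree in skill_trees: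
--         idx = 0
--         valid = True
--         for c in tree:
--             if c in skill:
--                 if idx < len(skill) and c == skill[idx]:
--                     idx += 1
--                 else:
--                     valid = False
--                     break
--         if valid:
--             answer += 1
--     return answer
-- ===== Notes on version B (the rewrite author's own statement) =====
-- stated objective: simpler
-- what changed: Instead of building exist/not_exist strings per tree and comparing exist with the slice skill[:len(exist)], B keeps a cursor idx into skill and a valid flag, advancing the cursor on each skill-char and breaking early on a mismatch.
import Mathlib
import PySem

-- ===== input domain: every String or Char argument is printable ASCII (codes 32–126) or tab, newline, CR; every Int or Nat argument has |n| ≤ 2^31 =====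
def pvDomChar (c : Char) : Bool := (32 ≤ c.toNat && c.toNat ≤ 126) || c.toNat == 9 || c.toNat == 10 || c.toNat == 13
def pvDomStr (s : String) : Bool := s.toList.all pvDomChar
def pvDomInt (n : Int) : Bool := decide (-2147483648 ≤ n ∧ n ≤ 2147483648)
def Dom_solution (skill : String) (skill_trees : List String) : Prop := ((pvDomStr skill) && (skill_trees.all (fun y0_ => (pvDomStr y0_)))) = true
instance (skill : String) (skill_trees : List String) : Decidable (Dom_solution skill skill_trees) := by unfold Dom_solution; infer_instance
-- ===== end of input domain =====

-- B replaces A's build-two-strings-then-compare-a-slice pass by a single cursor scan per tree (simpler decomposition).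

-- ===== PORT A =====
-- split tree's chars into (exist, not_exist) exactly as A's inner loop does
def aSplit (skill : List Char) (tree : List Char) : List Char × List Char :=
  tree.foldl (fun acc t =>
    if !(PySem.Chars.isIn [t] skill) then (acc.1, acc.2 ++ [t]) else (acc.1 ++ [t], acc.2))
    ([], [])

def solution (skill : String) (skill_trees : List String) : Int :=
  skill_trees.foldl (fun answer tree =>
    let pr := aSplit skill.toList tree.toList
    let length : Int := pr.1.length
    if pr.1 = PySem.List.slice skill.toList none (some length) then answer + 1
    else if pr.1.length = 0 ∧ pr.2 ≠ [] then answer + 1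
    else answer) 0

-- ===== PORT B =====
-- cursor scan: for each char in skill, it must be the next expected skill char; break (false) otherwise
-- (skill[idx]? = some c is exactly Source B's `idx < len(skill) and c == skill[idx]`)
def bCheck (skill : List Char) : List Char → Nat → Bool
  | [], _ => true
  | c :: cs, idx =>
    if c ∈ skill then
      if skill[idx]? = some c then bCheck skill cs (idx + 1) else false
    else bCheck skill cs idx

def solution_alt (skill : String) (skill_trees : List String) : Int :=
  skill_trees.foldl (fun answer tree =>
    if bCheck skill.toList tree.toList 0 then answer + 1 else answer) 0

-- ===== PRECONDITION & SPEC =====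
def Spec_solution (skill : String) (skill_trees : List String) (out : Int) : Prop := out = solution_alt skill skill_trees
instance (skill : String) (skill_trees : List String) (out : Int) : Decidable (Spec_solution skill skill_trees out) := by unfold Spec_solution; infer_instance

-- ===== CLAIM (what is proved, stated in full; the proofs are below) =====
def Claim_equal_solution : Prop := ∀ (skill : String) (skill_trees : List String), Dom_solution skill skill_trees → Spec_solution skill skill_trees (solution skill skill_trees)

-- ===== LEMMAS AND PROOFS =====

theorem isIn_singleton (s : List Char) (t : Char) :
    PySem.Chars.isIn [t] s = decide (t ∈ s) := by
  by_cases h : t ∈ s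
  · simp only [h, decide_true]
    rw [PySem.Chars.isIn_iff_infix]
    obtain ⟨l1, l2, rfl⟩ := List.append_of_mem h
    exact ⟨l1, l2, by simp⟩
  · simp only [h, decide_false]
    rw [PySem.Chars.isIn_eq_false_iff]
    intro hinf
    exact h (hinf.subset (by simp))

theorem aSplit_eq (s : List Char) (cs : List Char) :
    ∀ acc : List Char × List Char,
      cs.foldl (fun acc t =>
        if !(PySem.Chars.isIn [t] s) then (acc.1, acc.2 ++ [t]) else (acc.1 ++ [t], acc.2)) acc
      = (acc.1 ++ cs.filter (fun c => decide (c ∈ s)),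
         acc.2 ++ cs.filter (fun c => !decide (c ∈ s))) := by
  induction cs with
  | nil => intro acc; simp
  | cons c cs ih =>
    intro acc
    rw [List.foldl_cons]
    by_cases h : c ∈ s
    · rw [if_neg (by simp [isIn_singleton, h]), ih]
      simp [h]
    · rw [if_pos (by simp [isIn_singleton, h]), ih]
      simp [h]

theorem cons_prefix_drop (s : List Char) (c : Char) (l : List Char) (idx : ℕ) :
    c :: l <+: s.drop idx ↔ s[idx]? = some c ∧ l <+: s.drop (idx + 1) := by
  by_cases h : idx < s.length
  · rw [List.drop_eq_getElem_cons h, List.cons_prefix_cons, List.getElem?_eq_getElem h]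
    constructor
    · rintro ⟨rfl, h2⟩; exact ⟨rfl, h2⟩
    · rintro ⟨h1, h2⟩; exact ⟨(Option.some_injective _ h1).symm, h2⟩
  · rw [List.drop_eq_nil_of_le (by omega)]
    simp [List.getElem?_eq_none (by omega : s.length ≤ idx)]

theorem bCheck_iff (s : List Char) (cs : List Char) :
    ∀ idx : ℕ, bCheck s cs idx = true ↔ cs.filter (fun c => decide (c ∈ s)) <+: s.drop idx := by
  induction cs with
  | nil => intro idx; simp [bCheck]
  | cons c cs ih =>
    intro idx
    simp only [bCheck, List.filter_cons]
    by_cases h : c ∈ s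
    · simp only [h, if_true, decide_true]
      by_cases hg : s[idx]? = some c
      · rw [if_pos hg, ih, cons_prefix_drop]
        simp [hg]
      · rw [if_neg hg]
        simp only [Bool.false_eq_true, false_iff, cons_prefix_drop]
        rintro ⟨h1, -⟩; exact hg h1
    · simp [h, ih]

theorem tree_cond_eq (s : List Char) (cs : List Char) (answer : Int) :
    (let pr := aSplit s cs
     let length : Int := pr.1.length
     if pr.1 = PySem.List.slice s none (some length) then answer + 1
     else if pr.1.length = 0 ∧ pr.2 ≠ [] then answer + 1
     else answer)
    = (if bCheck s cs 0 then answer + 1 else answer) := by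
  have hsplit : aSplit s cs = (cs.filter (fun c => decide (c ∈ s)),
      cs.filter (fun c => !decide (c ∈ s))) := by
    rw [aSplit, aSplit_eq]; simp
  set f := cs.filter (fun c => decide (c ∈ s)) with hf
  have hslice : PySem.List.slice s none (some ((f.length : ℕ) : Int)) = s.take f.length :=
    PySem.List.slice_to_natCast s f.length
  have hpre : bCheck s cs 0 = true ↔ f <+: s := by
    rw [bCheck_iff]; simp [hf]
  simp only [hsplit, hslice]
  by_cases hb : bCheck s cs 0 = true
  · have : f <+: s := hpre.mp hb
    rw [if_pos (by rw [List.prefix_iff_eq_take] at this; exact this), if_pos hb]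
  · have hnp : ¬ f <+: s := fun h => hb (hpre.mpr h)
    rw [if_neg (by rw [← List.prefix_iff_eq_take] at *; exact hnp)]
    rw [if_neg, if_neg hb]
    rintro ⟨h0, -⟩
    exact hnp (by rw [List.length_eq_zero_iff] at h0; simp [h0])

-- ===== VERDICT (by name: the statement is the Claim_ definition above) =====
theorem solution_spec : Claim_equal_solution := by
  intro skill skill_trees _
  unfold Spec_solution solution solution_alt
  congr 1
  funext answer tree
  exact tree_cond_eq skill.toList tree.toList answer
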